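-- pv_equiv track=rewrite | github.com/ShivanshGhelani/BFP | app/core/location_utils.py | combine_location_data
-- ===== SOURCE A (Python) =====
-- from typing import Dict
--
-- def combine_location_data(sources: Dict) -> Dict:
--     """Combine location data from multiple sources to get the best information."""
--     combined = {}
--     # Priority order for different fields
--     source_priority = ["openstreetmap", "bigdatacloud", "ip_api"]
--     fields_to_combine = [
--         "country", "country_code", "state", "region", "city",
--         "district", "postcode", "timezone", "road", "suburb"
--     ]
--     for field in fields_to_combine:
--         for source in source_priority:
--             if source in sources and isinstance(sources[source], dict):
--                 value = sources[source].get(field)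
--                 if value and value != "":
--                     combined[field] = value
--                     combined[f"{field}_source"] = source
--                     break
--     # Special handling for display name
--     if "openstreetmap" in sources and "display_name" in sources["openstreetmap"]:
--         combined["full_address"] = sources["openstreetmap"]["display_name"]
--     # Create a formatted address
--     address_parts = []
--     if combined.get("road"):
--         address_parts.append(combined["road"])
--     if combined.get("city"):
--         address_parts.append(combined["city"])
--     if combined.get("state") or combined.get("region"):
--         address_parts.append(combined.get("state") or combined.get("region"))
--     if combined.get("country"):
--         address_parts.append(combined["country"])
--     if address_parts:
--         combined["formatted_address"] = ", ".join(address_parts)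
--     return combined
-- ===== SOURCE B (Python) =====
-- def combine_location_data(sources):
--     """Combine location data from multiple sources to get the best information."""
--     source_priority = ["openstreetmap", "bigdatacloud", "ip_api"]
--     fields_to_combine = [
--         "country", "country_code", "state", "region", "city",
--         "district", "postcode", "timezone", "road", "suburb"
--     ]
--     # One pass per source, lowest priority first: a later (higher-priority)
--     # source overwrites, so 'best' ends up holding the top-priority hit for
--     # each field, with the source it came from.
--     best = {}
--     for source in reversed(source_priority):
--         data = sources.get(source)
--         if isinstance(data, dict):
--             for field in fields_to_combine:
--                 value = data.get(field)
--                 if value: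
--                     best[field] = (value, source)
--     combined = {}
--     for field in fields_to_combine:
--         if field in best:
--             value, source = best[field]
--             combined[field] = value
--             combined[field + "_source"] = source
--     osm = sources.get("openstreetmap")
--     if isinstance(osm, dict) and "display_name" in osm:
--         combined["full_address"] = osm["display_name"]
--     parts = [combined[f] for f in ("road", "city") if combined.get(f)]
--     state_or_region = combined.get("state") or combined.get("region")
--     if state_or_region:
--         parts.append(state_or_region)
--     if combined.get("country"):
--         parts.append(combined["country"])
--     if parts:
--         combined["formatted_address"] = ", ".join(parts)
--     return combined
-- ===== Notes on version B (the rewrite author's own statement) =====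
-- stated objective: alternative
-- what changed: Replaces A's per-field inner scan over the sources with a break on first hit by a single reverse-priority merge pass that builds a best[field]=(value,source) map by overwriting, then emits the fields in one loop; the address-parts assembly for road/city becomes a comprehension.
import Mathlib
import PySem

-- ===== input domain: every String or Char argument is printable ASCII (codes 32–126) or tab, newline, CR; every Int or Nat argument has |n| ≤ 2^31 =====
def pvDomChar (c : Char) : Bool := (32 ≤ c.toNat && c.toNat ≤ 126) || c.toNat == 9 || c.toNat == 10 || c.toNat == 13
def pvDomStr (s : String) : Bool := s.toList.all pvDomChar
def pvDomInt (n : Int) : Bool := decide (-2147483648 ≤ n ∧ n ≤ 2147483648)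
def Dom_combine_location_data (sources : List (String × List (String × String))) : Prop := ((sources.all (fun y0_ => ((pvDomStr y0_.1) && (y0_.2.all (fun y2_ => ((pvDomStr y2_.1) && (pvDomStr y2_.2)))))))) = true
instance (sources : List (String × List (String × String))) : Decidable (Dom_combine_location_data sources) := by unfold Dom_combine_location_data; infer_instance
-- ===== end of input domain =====

-- B is an alternative decomposition of A (reverse-priority overwrite merge instead of A's
-- per-field break-on-first-hit scan); same cost, same return value.

-- ===== PORT A =====
-- The Python dicts are association lists; lookup (first match) is (PySem.Dict.mk l).get?.
-- 'isinstance(sources[source], dict)' is always true under the declared type, so it is not ported.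
def pvFieldsA : List String :=
  ["country", "country_code", "state", "region", "city",
   "district", "postcode", "timezone", "road", "suburb"]

def pvPriorityA : List String := ["openstreetmap", "bigdatacloud", "ip_api"]

-- Python truthiness of `combined.get(k)` (None or "" are falsy)
def pvTruthyA (o : Option String) : Bool :=
  match o with
  | some v => v ≠ ""
  | none => false

-- `a or b` on two .get results
def pvOrA (a b : Option String) : Option String :=
  match a with
  | some v => if v = "" then b else some v
  | none => b

-- A's inner `for source in source_priority: … break` loop for one field
def pvPickA (sources : List (String × List (String × String))) (field : String)
    (combined : PySem.Dict String String) : List String → PySem.Dict String String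
  | [] => combined
  | s :: rest =>
    match (PySem.Dict.mk sources).get? s with
    | some d =>
      match (PySem.Dict.mk d).get? field with
      | some v =>
        if v = "" then pvPickA sources field combined rest
        else (combined.insert field v).insert (field ++ "_source") s
      | none => pvPickA sources field combined rest
    | none => pvPickA sources field combined rest

def combine_location_data (sources : List (String × List (String × String))) : List (String × String) :=
  let combined := pvFieldsA.foldl (fun c f => pvPickA sources f c pvPriorityA) PySem.Dict.empty
  let combined :=
    match (PySem.Dict.mk sources).get? "openstreetmap" with
    | some osm =>
      match (PySem.Dict.mk osm).get? "display_name" with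
      | some v => combined.insert "full_address" v
      | none => combined
    | none => combined
  let address_parts : List String := []
  let address_parts :=
    if pvTruthyA (combined.get? "road") then address_parts ++ [(combined.get? "road").getD ""]
    else address_parts
  let address_parts :=
    if pvTruthyA (combined.get? "city") then address_parts ++ [(combined.get? "city").getD ""]
    else address_parts
  let sr := pvOrA (combined.get? "state") (combined.get? "region")
  let address_parts := if pvTruthyA sr then address_parts ++ [sr.getD ""] else address_parts
  let address_parts :=
    if pvTruthyA (combined.get? "country") then address_parts ++ [(combined.get? "country").getD ""]
    else address_parts
  let combined :=
    if address_parts ≠ [] then combined.insert "formatted_address" (PySem.Str.join ", " address_parts)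
    else combined
  combined.items

-- ===== PORT B =====
def pvFieldsB : List String :=
  ["country", "country_code", "state", "region", "city",
   "district", "postcode", "timezone", "road", "suburb"]

def pvPriorityB : List String := ["openstreetmap", "bigdatacloud", "ip_api"]

def pvTruthyB (o : Option String) : Bool :=
  match o with
  | some v => v ≠ ""
  | none => false

-- B's inner field loop for one source: record (value, source), overwriting lower priority
def pvMergeSrcB (s : String) (d : List (String × String))
    (best : PySem.Dict String (String × String)) : PySem.Dict String (String × String) :=
  pvFieldsB.foldl
    (fun b f =>
      match List.lookup f d with
      | some v => if v = "" then b else b.insert f (v, s)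
      | none => b)
    best

def combine_location_data_alt (sources : List (String × List (String × String))) : List (String × String) :=
  let best := pvPriorityB.reverse.foldl
    (fun b s =>
      match List.lookup s sources with
      | some d => pvMergeSrcB s d b
      | none => b)
    PySem.Dict.empty
  let combined := pvFieldsB.foldl
    (fun c f =>
      match best.get? f with
      | some (v, s) => (c.insert f v).insert (f ++ "_source") s
      | none => c)
    PySem.Dict.empty
  let combined :=
    match List.lookup "openstreetmap" sources with
    | some osm =>
      match List.lookup "display_name" osm with
      | some v => combined.insert "full_address" v
      | none => combined
    | none => combined
  let parts := (["road", "city"].filter (fun f => pvTruthyB (combined.get? f))).map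
      (fun f => (combined.get? f).getD "")
  let sr :=
    match combined.get? "state" with
    | some v => if v = "" then combined.get? "region" else some v
    | none => combined.get? "region"
  let parts :=
    match sr with
    | some v => if v = "" then parts else parts ++ [v]
    | none => parts
  let parts :=
    if pvTruthyB (combined.get? "country") then parts ++ [(combined.get? "country").getD ""]
    else parts
  let combined :=
    if parts.isEmpty then combined
    else combined.insert "formatted_address" (PySem.Str.join ", " parts)
  combined.items

-- ===== PRECONDITION & SPEC =====
def Spec_combine_location_data (sources : List (String × List (String × String))) (out : List (String × String)) : Prop := out = combine_location_data_alt sources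
instance (sources : List (String × List (String × String))) (out : List (String × String)) : Decidable (Spec_combine_location_data sources out) := by unfold Spec_combine_location_data; infer_instance

-- ===== CLAIM (what is proved, stated in full; the proofs are below) =====
def Claim_equal_combine_location_data : Prop := ∀ (sources : List (String × List (String × String))), Dom_combine_location_data sources → Spec_combine_location_data sources (combine_location_data sources)

-- ===== LEMMAS AND PROOFS =====

-- first-match lookup: Dict.mk vs List.lookup
theorem pv_mk_get?_eq_lookup {β : Type} (l : List (String × β)) (k : String) :
    (PySem.Dict.mk l).get? k = List.lookup k l := by
  induction l with
  | nil => simp [PySem.Dict.get?]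
  | cons p rest ih =>
    obtain ⟨a, b⟩ := p
    rw [PySem.Dict.get?_mk_cons]
    by_cases h : k = a
    · subst h; simp [List.lookup]
    · simp [List.lookup, ih, beq_eq_false_iff_ne.mpr h, Ne.symm h]

-- the first source (in priority order) holding a truthy value for field f
def pvHit (sources : List (String × List (String × String))) (f : String) :
    List String → Option (String × String)
  | [] => none
  | s :: rest =>
    match List.lookup s sources with
    | some d =>
      match List.lookup f d with
      | some v => if v = "" then pvHit sources f rest else some (v, s)
      | none => pvHit sources f rest
    | none => pvHit sources f rest

theorem pvPickA_eq_hit (sources : List (String × List (String × String))) (f : String)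
    (c : PySem.Dict String String) (prio : List String) :
    pvPickA sources f c prio =
      match pvHit sources f prio with
      | some (v, s) => (c.insert f v).insert (f ++ "_source") s
      | none => c := by
  induction prio with
  | nil => rfl
  | cons s rest ih =>
    simp only [pvPickA, pvHit, pv_mk_get?_eq_lookup]
    cases List.lookup s sources with
    | none => simpa using ih
    | some d =>
      dsimp only
      cases List.lookup f d with
      | none => simpa using ih
      | some v =>
        dsimp only
        by_cases h : v = "" <;> simp [h, ih]

-- one source's merge pass does not touch fields outside the field list
theorem pv_merge_get_not (s : String) (d : List (String × String)) (fl : List String)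
    (f : String) (hf : f ∉ fl) (b : PySem.Dict String (String × String)) :
    (fl.foldl
      (fun b f =>
        match List.lookup f d with
        | some v => if v = "" then b else b.insert f (v, s)
        | none => b)
      b).get? f = b.get? f := by
  induction fl generalizing b with
  | nil => rfl
  | cons g rest ih =>
    have hg : f ≠ g := fun e => hf (e ▸ List.mem_cons_self)
    have hr : f ∉ rest := fun m => hf (List.mem_cons_of_mem _ m)
    simp only [List.foldl_cons]
    rw [ih hr]
    cases List.lookup g d with
    | none => rfl
    | some v =>
      by_cases h : v = ""
      · simp [h]
      · simp [h, PySem.Dict.get?_insert_of_ne _ _ hg]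

-- effect of one source's merge pass on a field of the list
theorem pv_merge_get (s : String) (d : List (String × String)) (fl : List String)
    (hnd : fl.Nodup) (f : String) (hf : f ∈ fl) (b : PySem.Dict String (String × String)) :
    (fl.foldl
      (fun b f =>
        match List.lookup f d with
        | some v => if v = "" then b else b.insert f (v, s)
        | none => b)
      b).get? f =
      match List.lookup f d with
      | some v => if v = "" then b.get? f else some (v, s)
      | none => b.get? f := by
  induction fl generalizing b with
  | nil => cases hf
  | cons g rest ih =>
    simp only [List.foldl_cons]
    rcases List.mem_cons.mp hf with h | h
    · subst h
      have hr : f ∉ rest := (List.nodup_cons.mp hnd).1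
      rw [pv_merge_get_not s d rest f hr]
      cases List.lookup f d with
      | none => rfl
      | some v =>
        by_cases h : v = ""
        · simp [h]
        · simp [h, PySem.Dict.get?_insert_self]
    · have hg : f ≠ g := fun e => (List.nodup_cons.mp hnd).1 (e ▸ h)
      rw [ih (List.nodup_cons.mp hnd).2 h]
      cases List.lookup g d with
      | none => rfl
      | some v =>
        by_cases hv : v = ""
        · simp [hv]
        · cases List.lookup f d with
          | none => simp [hv, PySem.Dict.get?_insert_of_ne _ _ hg]
          | some w =>
            by_cases hw : w = "" <;>
              simp [hv, hw, PySem.Dict.get?_insert_of_ne _ _ hg]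

theorem pv_fieldsB_nodup : pvFieldsB.Nodup := by decide

-- pv_merge_get specialized to pvMergeSrcB
theorem pv_mergeSrcB_get (s : String) (d : List (String × String)) (f : String)
    (hf : f ∈ pvFieldsB) (b : PySem.Dict String (String × String)) :
    (pvMergeSrcB s d b).get? f =
      match List.lookup f d with
      | some v => if v = "" then b.get? f else some (v, s)
      | none => b.get? f :=
  pv_merge_get s d pvFieldsB pv_fieldsB_nodup f hf b

theorem pv_best_get (sources : List (String × List (String × String))) (prio : List String)
    (f : String) (hf : f ∈ pvFieldsB) :
    (prio.reverse.foldl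
      (fun b s =>
        match List.lookup s sources with
        | some d => pvMergeSrcB s d b
        | none => b)
      PySem.Dict.empty).get? f = pvHit sources f prio := by
  rw [List.foldl_reverse]
  induction prio with
  | nil => simp [pvHit, PySem.Dict.get?_empty]
  | cons s rest ih =>
    simp only [List.foldr_cons, pvHit]
    cases List.lookup s sources with
    | none => exact ih
    | some d =>
      dsimp only
      rw [pv_mergeSrcB_get s d f hf]
      cases List.lookup f d with
      | none => exact ih
      | some v =>
        by_cases h : v = ""
        · simp [h, ih]
        · simp [h]

-- the address/formatted tail of the two ports agrees, generalized over the five lookups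
theorem pv_tail_gen (c : PySem.Dict String String) (r ci st re co : Option String) :
    (let ap : List String := []
     let ap := if pvTruthyA r then ap ++ [r.getD ""] else ap
     let ap := if pvTruthyA ci then ap ++ [ci.getD ""] else ap
     let sr := pvOrA st re
     let ap := if pvTruthyA sr then ap ++ [sr.getD ""] else ap
     let ap := if pvTruthyA co then ap ++ [co.getD ""] else ap
     if ap ≠ [] then c.insert "formatted_address" (PySem.Str.join ", " ap) else c) =
    (let parts := (if pvTruthyB r then [r.getD ""] else []) ++
        (if pvTruthyB ci then [ci.getD ""] else [])
     let sr :=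
       match st with
       | some v => if v = "" then re else some v
       | none => re
     let parts :=
       match sr with
       | some v => if v = "" then parts else parts ++ [v]
       | none => parts
     let parts := if pvTruthyB co then parts ++ [co.getD ""] else parts
     if parts.isEmpty then c else c.insert "formatted_address" (PySem.Str.join ", " parts)) := by
  have hT : pvTruthyB = pvTruthyA := rfl
  have hsr : (match st with
      | some v => if v = "" then re else some v
      | none => re) = pvOrA st re := rfl
  rw [hT, hsr]
  rcases pvOrA st re with _ | v
  · have h0 : pvTruthyA none = false := rfl
    by_cases h1 : pvTruthyA r <;> by_cases h2 : pvTruthyA ci <;>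
      by_cases h3 : pvTruthyA co <;>
        simp [h0, h1, h2, h3]
  · by_cases hv : v = ""
    · by_cases h1 : pvTruthyA r <;> by_cases h2 : pvTruthyA ci <;>
        by_cases h3 : pvTruthyA co <;>
          simp [hv, h1, h2, h3, show pvTruthyA (some "") = false from rfl]
    · have h4 : pvTruthyA (some v) = true := by simp [pvTruthyA, hv]
      by_cases h1 : pvTruthyA r <;> by_cases h2 : pvTruthyA ci <;>
        by_cases h3 : pvTruthyA co <;>
          simp [h4, hv, h1, h2, h3]

-- B's comprehension over ("road", "city") as two conditional singletons
theorem pv_filter_two (c : PySem.Dict String String) :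
    (["road", "city"].filter (fun f => pvTruthyB (c.get? f))).map
        (fun f => (c.get? f).getD "") =
      (if pvTruthyB (c.get? "road") then [(c.get? "road").getD ""] else []) ++
        (if pvTruthyB (c.get? "city") then [(c.get? "city").getD ""] else []) := by
  by_cases h1 : pvTruthyB (c.get? "road") <;> by_cases h2 : pvTruthyB (c.get? "city") <;>
    simp [h1, h2]

-- A's display-name step with both lookups phrased as List.lookup
theorem pv_display_eq (combined : PySem.Dict String String)
    (sources : List (String × List (String × String))) :
    (match (PySem.Dict.mk sources).get? "openstreetmap" with
     | some osm =>
       match (PySem.Dict.mk osm).get? "display_name" with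
       | some v => combined.insert "full_address" v
       | none => combined
     | none => combined) =
    (match List.lookup "openstreetmap" sources with
     | some osm =>
       match List.lookup "display_name" osm with
       | some v => combined.insert "full_address" v
       | none => combined
     | none => combined) := by
  rw [pv_mk_get?_eq_lookup]
  cases List.lookup "openstreetmap" sources with
  | none => rfl
  | some osm =>
    dsimp only
    rw [pv_mk_get?_eq_lookup]

-- ===== VERDICT (by name: the statement is the Claim_ definition above) =====
theorem combine_location_data_spec : Claim_equal_combine_location_data := by
  intro sources _
  unfold Spec_combine_location_data
  have hfAB : pvFieldsA = pvFieldsB := rfl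
  have hpAB : pvPriorityA = pvPriorityB := rfl
  have hc :
      pvFieldsA.foldl (fun c f => pvPickA sources f c pvPriorityA) PySem.Dict.empty =
      pvFieldsB.foldl
        (fun c f =>
          match
            (pvPriorityB.reverse.foldl
              (fun b s =>
                match List.lookup s sources with
                | some d => pvMergeSrcB s d b
                | none => b)
              PySem.Dict.empty).get? f with
          | some (v, s) => (c.insert f v).insert (f ++ "_source") s
          | none => c)
        PySem.Dict.empty := by
    rw [hfAB]
    apply PySem.List.foldl_congr_mem'
    intro f hf c
    rw [pvPickA_eq_hit, pv_best_get sources pvPriorityB f hf, hpAB]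
  unfold combine_location_data combine_location_data_alt
  simp only [hc, pv_display_eq, pv_filter_two]
  exact congrArg PySem.Dict.items (pv_tail_gen _ _ _ _ _ _)
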